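-- pv_equiv track=rewrite | github.com/Tomas-Perez/Algebra3 | src/TP6/Exercise4.py | array_to_matrix
-- ===== SOURCE A (Python) =====
-- def array_to_matrix(array):
--     summation = 0
--     matrix_len = 0
--     for i in range(len(array)):
--         summation += i
--         if summation == len(array):
--             matrix_len = i
--             break
--     result = [[0] * matrix_len for _ in range(matrix_len)]
--     k = 0
--     for i in range(matrix_len):
--         for j in range(i, matrix_len):
--             result[i][j] = array[k]
--             k += 1
--     return result
-- ===== SOURCE B (Python) =====
-- def array_to_matrix(array):
--     # side length in closed form (integer sqrt of 8n+1), then per-row slicing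
--     def _isqrt(x):
--         if x < 2:
--             return x
--         r = x
--         y = (x + 1) // 2
--         while y < r:
--             r = y
--             y = (y + x // y) // 2
--         return r
--     n = len(array)
--     m = (_isqrt(8 * n + 1) - 1) // 2
--     if m * (m + 1) // 2 != n:
--         return []
--     rows = []
--     k = 0
--     for i in range(m):
--         rows.append([0] * i + array[k:k + (m - i)])
--         k += m - i
--     return rows
-- ===== Notes on version B (the rewrite author's own statement) =====
-- stated objective: faster
-- what changed: The accumulating search loop for the side length is replaced by a closed-form integer-sqrt computation with a triangular-number check, and the cell-by-cell double-loop fill of a preallocated zero matrix is replaced by building each row directly as a zero prefix plus a slice of the input.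
-- intended difference: On length-1 arrays A returns [] because its search loop 'for i in range(len(array))' never reaches i=1, while B returns [[x]], the 1x1 upper-triangular matrix, which is the intended packing of a triangular-length array. — e.g. on array_to_matrix([5]): A returns [], B returns [[5]]
import Mathlib
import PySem

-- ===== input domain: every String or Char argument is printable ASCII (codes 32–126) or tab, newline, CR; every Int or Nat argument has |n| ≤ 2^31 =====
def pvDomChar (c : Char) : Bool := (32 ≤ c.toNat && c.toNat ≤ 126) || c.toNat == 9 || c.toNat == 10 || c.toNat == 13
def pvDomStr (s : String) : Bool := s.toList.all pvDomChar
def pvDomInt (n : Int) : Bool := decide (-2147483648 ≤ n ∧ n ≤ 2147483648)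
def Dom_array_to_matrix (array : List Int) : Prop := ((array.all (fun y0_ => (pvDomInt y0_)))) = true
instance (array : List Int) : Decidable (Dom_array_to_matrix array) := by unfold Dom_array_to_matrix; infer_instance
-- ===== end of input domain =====

-- B replaces A's accumulating side-length search with a Newton integer-sqrt closed form and the
-- cell-by-cell fill with per-row slicing (measured constant-factor speedup); on length-1 arrays A's
-- loop accidentally returns [] where B returns the intended 1x1 matrix (stated as D_ below).


-- ===== PORT A =====
-- A's first loop: for i in range(n): summation += i; if summation == n: matrix_len = i; break
-- (indices/sums are nonnegative throughout, so Nat state is exact)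
def pvLoopA (n : Nat) (i : Nat) (summation : Nat) : Nat :=
  if i < n then
    let s := summation + i
    if s = n then i else pvLoopA n (i + 1) s
  else 0
termination_by n - i

-- A's fill; array[k] is always in range when reached (k < len(array)), so getD 0 is exact
def array_to_matrix (array : List Int) : List (List Int) :=
  let n := array.length
  let matrix_len := pvLoopA n 0 0
  let result := (List.range matrix_len).map (fun _ => List.replicate matrix_len (0 : Int))
  ((List.range matrix_len).foldl
    (fun (st : List (List Int) × Nat) i =>
      (List.range' i (matrix_len - i)).foldl
        (fun (st : List (List Int) × Nat) j =>
          (st.1.set i ((st.1.getD i []).set j (array.getD st.2 0)), st.2 + 1)) st)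
    (result, 0)).1

-- ===== PORT B =====
-- Source B's hand-written Newton isqrt: r = x; y = (x+1)//2; while y < r: r = y; y = (y + x//y)//2
def pvIsqrtLoop (x : Nat) (r y : Nat) : Nat :=
  if y < r then pvIsqrtLoop x y ((y + x / y) / 2) else r
termination_by r

def pvIsqrt (x : Nat) : Nat :=
  if x < 2 then x else pvIsqrtLoop x x ((x + 1) / 2)

-- Source B's row loop: rows.append([0]*i + array[k:k+(m-i)]); k += m-i
def pvBuildRows (array : List Int) (m : Nat) (i k : Nat) : List (List Int) :=
  if i < m then
    (List.replicate i (0 : Int) ++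
      PySem.List.slice array (some (k : Int)) (some ((k : Int) + ((m - i : Nat) : Int))))
      :: pvBuildRows array m (i + 1) (k + (m - i))
  else []
termination_by m - i

def array_to_matrix_alt (array : List Int) : List (List Int) :=
  let n := array.length
  let m := (pvIsqrt (8 * n + 1) - 1) / 2
  if m * (m + 1) / 2 = n then pvBuildRows array m 0 0 else []

-- ===== PRECONDITION & SPEC =====
-- On length-1 arrays A returns [] (its search loop never reaches index 1) while B returns
-- the 1x1 matrix [[x]], the intended packing of a triangular-length array.
def D_array_to_matrix (array : List Int) : Prop := array.length = 1
instance (array : List Int) : Decidable (D_array_to_matrix array) := by unfold D_array_to_matrix; infer_instance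

def Spec_array_to_matrix (array : List Int) (out : List (List Int)) : Prop :=
  ¬ D_array_to_matrix array → out = array_to_matrix_alt array
instance (array : List Int) (out : List (List Int)) : Decidable (Spec_array_to_matrix array out) := by unfold Spec_array_to_matrix; infer_instance

def pvDiffWitness_array_to_matrix : List Int := [5]
def pvDiffWitnessOut_array_to_matrix : (List (List Int)) × (List (List Int)) := ([], [[5]])

-- ===== CLAIM (what is proved, stated in full; the proofs are below) =====
def Claim_unchanged_array_to_matrix : Prop := ∀ (array : List Int), Dom_array_to_matrix array → Spec_array_to_matrix array (array_to_matrix array)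
def Claim_changed_array_to_matrix : Prop := Dom_array_to_matrix (pvDiffWitness_array_to_matrix) ∧ D_array_to_matrix (pvDiffWitness_array_to_matrix) ∧ array_to_matrix (pvDiffWitness_array_to_matrix) = pvDiffWitnessOut_array_to_matrix.1 ∧ array_to_matrix_alt (pvDiffWitness_array_to_matrix) = pvDiffWitnessOut_array_to_matrix.2 ∧ pvDiffWitnessOut_array_to_matrix.1 ≠ pvDiffWitnessOut_array_to_matrix.2
def Claim_exact_array_to_matrix : Prop := ∀ (array : List Int), Dom_array_to_matrix array → D_array_to_matrix array → array_to_matrix array ≠ array_to_matrix_alt array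

-- ===== LEMMAS AND PROOFS =====

-- Newton step stays at or above the integer square root
theorem pv_step_ge_sqrt (x y : Nat) (hy : 1 ≤ y) : Nat.sqrt x ≤ (y + x / y) / 2 := by
  by_contra h
  rw [Nat.not_le] at h
  set s := Nat.sqrt x with hs
  have hsx : s * s ≤ x := by have h' := Nat.sqrt_le' x; rwa [pow_two] at h'
  have hq : x < (x / y + 1) * y := by
    have hmod := Nat.div_add_mod x y
    have hlt := Nat.mod_lt x (by omega : 0 < y)
    nlinarith
  have h2 : y + x / y < 2 * s := by omega
  have h3 : (x / y + 1) * y ≤ (2 * s - y) * y := by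
    apply Nat.mul_le_mul_right
    omega
  have h4 : (2 * s - y) * y ≤ s * s := by
    rcases Nat.le_total y (2 * s) with hle | hle
    · zify [hle]
      nlinarith [sq_nonneg ((s : Int) - y)]
    · have h0 : 2 * s - y = 0 := by omega
      simp [h0]
  exact absurd (lt_of_lt_of_le hq (le_trans h3 (le_trans h4 hsx))) (lt_irrefl x)

theorem pv_isqrtLoop_eq (x : Nat) (hx : 2 ≤ x) :
    ∀ r, 1 ≤ r → Nat.sqrt x ≤ r → pvIsqrtLoop x r ((r + x / r) / 2) = Nat.sqrt x := by
  intro r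
  induction r using Nat.strong_induction_on with
  | _ r ih =>
    intro hr hsr
    rw [pvIsqrtLoop]
    set y := (r + x / r) / 2 with hy
    have hsy : Nat.sqrt x ≤ y := pv_step_ge_sqrt x r hr
    have hspos : 1 ≤ Nat.sqrt x := by
      have := Nat.sqrt_pos.mpr (by omega : 0 < x)
      omega
    split
    · exact ih y (by omega) (by omega) hsy
    · rename_i hnl
      have hry : r ≤ y := by omega
      have h1 : 2 * r ≤ r + x / r := by
        have := Nat.lt_succ_iff.mp (Nat.lt_succ_of_le hry)
        omega
      have h2 : r ≤ x / r := by omega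
      have h3 : r * r ≤ x := by
        have := (Nat.le_div_iff_mul_le (by omega : 0 < r)).mp h2
        omega
      have : r ≤ Nat.sqrt x := Nat.le_sqrt'.mpr (by rwa [pow_two])
      omega

theorem pv_isqrt_eq (x : Nat) : pvIsqrt x = Nat.sqrt x := by
  unfold pvIsqrt
  split
  · interval_cases x <;> decide
  · rename_i h
    have hx : 2 ≤ x := by omega
    have hdiv : (x + 1) / 2 = (x + x / x) / 2 := by
      rw [Nat.div_self (by omega : 0 < x)]
    rw [hdiv]
    exact pv_isqrtLoop_eq x hx x (by omega) (Nat.sqrt_le_self x)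

-- j*(j+1) is strictly monotone, hence injective
theorem pv_tri_inj (i j : Nat) (h : i * (i + 1) = j * (j + 1)) : i = j := by
  rcases Nat.lt_trichotomy i j with hlt | heq | hlt
  · nlinarith
  · exact heq
  · nlinarith

-- A's search loop finds the (unique) j with j*(j+1)/2 = n, if it exists below n
theorem pv_loopA_finds (n j : Nat) (hj : j < n) (hT : j * (j + 1) = 2 * n) :
    ∀ d i s, i + d = j → 2 * s + i = i * i → pvLoopA n i s = j := by
  intro d
  induction d with
  | zero =>
    intro i s hd hs
    have hij : i = j := by omega
    subst hij
    rw [pvLoopA, if_pos (by omega : i < n)]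
    have hexp : i * (i + 1) = i * i + i := by ring
    have hhit : s + i = n := by omega
    simp [hhit]
  | succ d ihd =>
    intro i s hd hs
    rw [pvLoopA, if_pos (by omega : i < n)]
    have hhit : s + i ≠ n := by
      intro he
      have hexp : i * (i + 1) = i * i + i := by ring
      have hTi : i * (i + 1) = 2 * n := by omega
      have : i = j := pv_tri_inj i j (by omega)
      omega
    rw [if_neg hhit]
    exact ihd (i + 1) (s + i) (by omega)
      (by nlinarith)

-- and returns 0 when no such j exists
theorem pv_loopA_none (n : Nat) (hnone : ∀ j, j < n → j * (j + 1) ≠ 2 * n) :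
    ∀ d i s, n ≤ i + d → 2 * s + i = i * i → pvLoopA n i s = 0 := by
  intro d
  induction d with
  | zero =>
    intro i s hd hs
    rw [pvLoopA, if_neg (by omega : ¬ i < n)]
  | succ d ihd =>
    intro i s hd hs
    rw [pvLoopA]
    split
    · rename_i hin
      have hhit : s + i ≠ n := by
        intro he
        apply hnone i hin
        have hexp : i * (i + 1) = i * i + i := by ring
        omega
      rw [if_neg hhit]
      exact ihd (i + 1) (s + i) (by omega)
        (by nlinarith)
    · rfl

-- writeSeg: the row after the inner loop wrote c consecutive cells from position j0 with array[k..]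
def pvSetSeg (array : List Int) (row : List Int) : Nat → Nat → Nat → List Int
  | _, 0, _ => row
  | j0, c + 1, k => pvSetSeg array (row.set j0 (array.getD k 0)) (j0 + 1) c (k + 1)

theorem pv_inner_eq (array : List Int) (i : Nat) :
    ∀ (c j0 k : Nat) (mat : List (List Int)), i < mat.length →
    (List.range' j0 c).foldl
      (fun (st : List (List Int) × Nat) j =>
        (st.1.set i ((st.1.getD i []).set j (array.getD st.2 0)), st.2 + 1)) (mat, k)
    = (mat.set i (pvSetSeg array (mat.getD i []) j0 c k), k + c) := by
  intro c
  induction c with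
  | zero =>
    intro j0 k mat hi
    simp only [List.range'_zero, List.foldl_nil, pvSetSeg]
    rw [List.getD_eq_getElem mat [] hi, List.set_getElem_self]
    simp
  | succ c ihc =>
    intro j0 k mat hi
    rw [List.range'_succ, List.foldl_cons]
    rw [ihc (j0 + 1) (k + 1) _ (by simpa using hi)]
    simp only [List.set_set]
    rw [List.getD_eq_getElem _ [] (by simpa using hi)]
    rw [List.getElem_set_self]
    rw [List.getD_eq_getElem mat [] hi]
    simp [pvSetSeg]
    omega

theorem pv_take_set_succ {A : Type} (l : List A) (i : Nat) (a : A) (h : i < l.length) :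
    (l.set i a).take (i + 1) = l.take i ++ [a] := by
  apply List.ext_getElem
  · simp; omega
  · intro t ht1 ht2
    simp only [List.getElem_take, List.getElem_set]
    by_cases htj : t = i
    · subst htj; simp
    · have ht' : t < i := by simp at ht2; omega
      simp [Nat.min_eq_left (le_of_lt h), ht', List.getElem_take]
      exact fun hh => absurd hh (by omega)

theorem pv_setSeg_eq (array : List Int) :
    ∀ (c j0 k : Nat) (row : List Int), j0 + c ≤ row.length → k + c ≤ array.length →
    pvSetSeg array row j0 c k = row.take j0 ++ (array.drop k).take c ++ row.drop (j0 + c) := by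
  intro c
  induction c with
  | zero =>
    intro j0 k row hr ha
    simp [pvSetSeg]
  | succ c ihc =>
    intro j0 k row hr ha
    have hj0 : j0 < row.length := by omega
    have hk : k < array.length := by omega
    show pvSetSeg array (row.set j0 (array.getD k 0)) (j0 + 1) c (k + 1) = _
    rw [ihc (j0 + 1) (k + 1) _ (by simpa using (by omega : j0 + 1 + c ≤ row.length)) (by omega)]
    have h1 : (row.set j0 (array.getD k 0)).take (j0 + 1) = row.take j0 ++ [array.getD k 0] :=
      pv_take_set_succ row j0 _ hj0
    have h2 : (row.set j0 (array.getD k 0)).drop (j0 + 1 + c) = row.drop (j0 + 1 + c) := by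
      rw [List.drop_set]
      split
      all_goals first
        | rfl
        | (rename_i hcond; exact absurd hcond (by omega))
    have h3 : (array.drop k).take (c + 1) = array.getD k 0 :: (array.drop (k + 1)).take c := by
      rw [List.getD_eq_getElem array 0 hk, List.drop_eq_getElem_cons hk]
      rw [List.take_succ_cons]
    rw [h1, h2, h3]
    have harith : j0 + 1 + c = j0 + (c + 1) := by omega
    rw [harith]
    simp

theorem pv_outer_eq (array : List Int) (m : Nat) :
    ∀ (d i k : Nat) (mat : List (List Int)), i + d = m → mat.length = m →
    (∀ t, i ≤ t → t < m → mat.getD t [] = List.replicate m (0 : Int)) →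
    2 * k + d * (d + 1) ≤ 2 * array.length →
    ((List.range' i d).foldl
      (fun (st : List (List Int) × Nat) i' =>
        (List.range' i' (m - i')).foldl
          (fun (st : List (List Int) × Nat) j =>
            (st.1.set i' ((st.1.getD i' []).set j (array.getD st.2 0)), st.2 + 1)) st)
      (mat, k)).1
    = mat.take i ++ pvBuildRows array m i k := by
  intro d
  induction d with
  | zero =>
    intro i k mat hi hlen hrows hbound
    simp only [List.range'_zero, List.foldl_nil]
    rw [pvBuildRows, if_neg (by omega : ¬ i < m)]
    rw [List.append_nil, List.take_of_length_le (by omega)]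
  | succ d ihd =>
    intro i k mat hi hlen hrows hbound
    have him : i < m := by omega
    have hmi : m - i = d + 1 := by omega
    rw [List.range'_succ, List.foldl_cons, hmi]
    rw [pv_inner_eq array i (d + 1) i k mat (by omega)]
    rw [hrows i (le_refl i) him]
    rw [pv_setSeg_eq array (d + 1) i k _ (by simp; omega) (by nlinarith)]
    have hrow : (List.replicate m (0 : Int)).take i ++ (array.drop k).take (d + 1) ++
        (List.replicate m (0 : Int)).drop (i + (d + 1)) =
        List.replicate i (0 : Int) ++ (array.drop k).take (d + 1) := by
      rw [List.take_replicate, List.drop_replicate]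
      have e1 : min i m = i := by omega
      have e2 : m - (i + (d + 1)) = 0 := by omega
      simp [e1, e2]
    rw [hrow]
    rw [ihd (i + 1) (k + (d + 1)) _ (by omega) (by simpa using hlen)
      (by
        intro t ht1 ht2
        rw [List.getD_eq_getElem?_getD, List.getElem?_set_ne (by omega : i ≠ t),
          ← List.getD_eq_getElem?_getD]
        exact hrows t (by omega) ht2)
      (by nlinarith)]
    rw [pv_take_set_succ mat i _ (by omega)]
    have hB : pvBuildRows array m i k =
        (List.replicate i (0 : Int) ++ (array.drop k).take (d + 1)) :: pvBuildRows array m (i + 1) (k + (d + 1)) := by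
      rw [pvBuildRows, if_pos him, PySem.List.slice_natCast_add, hmi]
    rw [hB]
    simp

-- small closed computations (the WF-recursive helpers do not kernel-reduce, so compute by rw)
theorem pv_loopA_zero : pvLoopA 0 0 0 = 0 := by rw [pvLoopA]; norm_num

theorem pv_loopA_one : pvLoopA 1 0 0 = 0 := by
  rw [pvLoopA]
  norm_num
  rw [pvLoopA]
  norm_num

theorem pv_build_zero (array : List Int) (i k : Nat) : pvBuildRows array 0 i k = [] := by
  rw [pvBuildRows]
  norm_num

theorem pv_A_zero : array_to_matrix [] = [] := by
  norm_num [array_to_matrix, pv_loopA_zero]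

theorem pv_B_zero : array_to_matrix_alt [] = [] := by
  norm_num [array_to_matrix_alt, pv_isqrt_eq, Nat.sqrt_one, pv_build_zero]

theorem pv_A_one (x : Int) : array_to_matrix [x] = [] := by
  norm_num [array_to_matrix, pv_loopA_one]

theorem pv_B_one (x : Int) : array_to_matrix_alt [x] = [[x]] := by
  simp only [array_to_matrix_alt, List.length_cons, List.length_nil]
  rw [pv_isqrt_eq, show 8 * (0 + 1) + 1 = 9 by norm_num,
    show Nat.sqrt 9 = 3 by rw [show (9 : Nat) = 3 ^ 2 from rfl, Nat.sqrt_eq']]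
  norm_num
  rw [pvBuildRows]
  norm_num
  constructor
  · rw [show (1 : Int) = ((1 : Nat) : Int) from rfl, PySem.List.slice_to_natCast]
    simp
  · rw [pvBuildRows]
    norm_num

theorem pv_main (array : List Int) (h1 : array.length ≠ 1) :
    array_to_matrix array = array_to_matrix_alt array := by
  by_cases hn0 : array.length = 0
  · have harr : array = [] := List.eq_nil_of_length_eq_zero hn0
    rw [harr, pv_A_zero, pv_B_zero]
  simp only [array_to_matrix, array_to_matrix_alt]
  set n := array.length with hn
  · have hn2 : 2 ≤ n := by omega
    by_cases h : ∃ j, j < n ∧ j * (j + 1) = 2 * n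
    · obtain ⟨j, hj, hT⟩ := h
      have hA : pvLoopA n 0 0 = j := pv_loopA_finds n j hj hT j 0 0 (by omega) (by omega)
      have hsq : 8 * n + 1 = (2 * j + 1) ^ 2 := by nlinarith
      have hm0 : (pvIsqrt (8 * n + 1) - 1) / 2 = j := by
        rw [pv_isqrt_eq, hsq, Nat.sqrt_eq']
        omega
      have hcond : j * (j + 1) / 2 = n := by omega
      rw [hA, hm0, if_pos hcond]
      have hmat : (List.range j).map (fun _ => List.replicate j (0 : Int)) =
          List.replicate j (List.replicate j (0 : Int)) := by
        simp
      rw [hmat, List.range_eq_range']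
      have hout := pv_outer_eq array j j 0 0 (List.replicate j (List.replicate j (0 : Int)))
        (by omega) (by simp)
        (by
          intro t ht1 ht2
          rw [List.getD_eq_getElem _ _ (by simpa using ht2)]
          simp)
        (by omega)
      simpa using hout
    · have h' : ∀ j, j < n → j * (j + 1) ≠ 2 * n := by
        intro j hjn hje
        exact h ⟨j, hjn, hje⟩
      have hA : pvLoopA n 0 0 = 0 := pv_loopA_none n h' n 0 0 (by omega) (by omega)
      rw [hA]
      set m0 := (pvIsqrt (8 * n + 1) - 1) / 2 with hm0
      have hcond : ¬ (m0 * (m0 + 1) / 2 = n) := by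
        intro hc
        obtain ⟨t, ht⟩ := Nat.even_mul_succ_self m0
        have hT : m0 * (m0 + 1) = 2 * n := by omega
        have hm0big : 2 ≤ m0 := by nlinarith
        exact h' m0 (by nlinarith) hT
      rw [if_neg hcond]
      simp

-- ===== VERDICT (by name: the statement is the Claim_ definition above) =====
theorem array_to_matrix_spec : Claim_unchanged_array_to_matrix := by
  intro array _
  unfold Spec_array_to_matrix
  intro hD
  exact pv_main array hD

theorem array_to_matrix_changed : Claim_changed_array_to_matrix := by
  unfold Claim_changed_array_to_matrix pvDiffWitness_array_to_matrix pvDiffWitnessOut_array_to_matrix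
  exact ⟨by decide, rfl, pv_A_one 5, pv_B_one 5, by decide⟩

theorem array_to_matrix_tight : Claim_exact_array_to_matrix := by
  unfold Claim_exact_array_to_matrix
  intro array _ hD
  unfold D_array_to_matrix at hD
  obtain ⟨x, hx⟩ : ∃ x, array = [x] := by
    match array, hD with
    | [x], _ => exact ⟨x, rfl⟩
  subst hx
  rw [pv_A_one, pv_B_one]
  simp
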